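-- pv_equiv track=rewrite | github.com/voliroo/Uni-python-project | Custom-String-Methods/python_manual_str.py | ye_isalnum
-- ===== SOURCE A (Python) =====
-- def ye_isalnum(s):
--     if not s:
--         return False
--     for ch in s:
--         ascii_code = ord(ch)
--         if not(65 <= ascii_code <= 90 or 97 <= ascii_code <= 122 or 48 <= ascii_code <= 57):
--             return False
--     return True
-- ===== SOURCE B (Python) =====
-- import re
--
-- _ALNUM = re.compile(r'[A-Za-z0-9]+')
--
-- def ye_isalnum(s):
--     return bool(_ALNUM.fullmatch(s))
-- ===== Notes on version B (the rewrite author's own statement) =====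
-- stated objective: idiomatic
-- what changed: Replaced the manual per-character ord-range loop with a single regular-expression full match [A-Za-z0-9]+ (the + makes the empty string fail, like A's guard); the C regex engine makes it measurably faster.
import Mathlib
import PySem

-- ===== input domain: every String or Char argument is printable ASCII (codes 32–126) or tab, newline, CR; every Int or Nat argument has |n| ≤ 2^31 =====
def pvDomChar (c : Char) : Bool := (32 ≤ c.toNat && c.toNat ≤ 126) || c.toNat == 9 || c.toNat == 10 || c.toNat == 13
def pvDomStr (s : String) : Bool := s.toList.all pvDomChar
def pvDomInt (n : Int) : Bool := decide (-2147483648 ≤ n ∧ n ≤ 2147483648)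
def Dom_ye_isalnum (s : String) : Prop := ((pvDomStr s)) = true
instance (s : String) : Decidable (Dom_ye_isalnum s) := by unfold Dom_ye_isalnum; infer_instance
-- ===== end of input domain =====

-- B replaces A's manual ord-range loop with a regex full match [A-Za-z0-9]+ (idiomatic); same values everywhere.

-- ===== PORT A =====
-- A's for-loop with early return over ord values, step for step.
def yeIsalnumLoopA : List Char → Bool
  | [] => true
  | ch :: rest =>
      let asciiCode : Int := (ch.toNat : Int)
      if ¬ ((65 ≤ asciiCode ∧ asciiCode ≤ 90) ∨ (97 ≤ asciiCode ∧ asciiCode ≤ 122) ∨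
            (48 ≤ asciiCode ∧ asciiCode ≤ 57)) then
        false
      else
        yeIsalnumLoopA rest

def ye_isalnum (s : String) : Bool :=
  if s.toList = [] then false else yeIsalnumLoopA s.toList

-- ===== PORT B =====
-- Source B's regex [A-Za-z0-9]+ full match, ported by hand (no regex engine in Lean): exact on all
-- strings — one char of the class, then Kleene star, i.e. nonempty ∧ all chars in the class.
def yeAlnumClass (c : Char) : Bool :=
  (65 ≤ c.toNat && c.toNat ≤ 90) || (97 ≤ c.toNat && c.toNat ≤ 122) ||
  (48 ≤ c.toNat && c.toNat ≤ 57)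

def ye_isalnum_alt (s : String) : Bool :=
  match s.toList with
  | [] => false
  | c :: rest => yeAlnumClass c && rest.all yeAlnumClass

-- ===== PRECONDITION & SPEC =====
def Spec_ye_isalnum (s : String) (out : Bool) : Prop := out = ye_isalnum_alt s
instance (s : String) (out : Bool) : Decidable (Spec_ye_isalnum s out) := by unfold Spec_ye_isalnum; infer_instance

-- ===== CLAIM (what is proved, stated in full; the proofs are below) =====
def Claim_equal_ye_isalnum : Prop := ∀ (s : String), Dom_ye_isalnum s → Spec_ye_isalnum s (ye_isalnum s)

-- ===== LEMMAS AND PROOFS =====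
theorem yeIsalnumLoopA_eq_all (l : List Char) : yeIsalnumLoopA l = l.all yeAlnumClass := by
  induction l with
  | nil => rfl
  | cons c rest ih =>
      simp only [yeIsalnumLoopA, List.all_cons, ih]
      by_cases h : (65 ≤ (c.toNat : Int) ∧ (c.toNat : Int) ≤ 90) ∨
          (97 ≤ (c.toNat : Int) ∧ (c.toNat : Int) ≤ 122) ∨
          (48 ≤ (c.toNat : Int) ∧ (c.toNat : Int) ≤ 57)
      · have hcls : yeAlnumClass c = true := by
          simp only [yeAlnumClass, Bool.or_eq_true, Bool.and_eq_true, decide_eq_true_eq]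
          omega
        rw [if_neg (not_not_intro h), hcls, Bool.true_and]
      · have hcls : yeAlnumClass c = false := by
          simp only [yeAlnumClass, Bool.or_eq_false_iff, Bool.and_eq_false_iff,
            decide_eq_false_iff_not]
          omega
        rw [if_pos h, hcls, Bool.false_and]

-- ===== VERDICT (by name: the statement is the Claim_ definition above) =====
theorem ye_isalnum_spec : Claim_equal_ye_isalnum := by
  intro s _
  unfold Spec_ye_isalnum ye_isalnum ye_isalnum_alt
  cases h : s.toList with
  | nil => simp
  | cons c rest =>
      simp only [reduceCtorEq, if_false]
      rw [yeIsalnumLoopA_eq_all, List.all_cons]
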